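-- pv_equiv track=rewrite | github.com/arsamigullin/problem_solving_python | leet/Strings/Longest_Substring_Without_Two_Contiguous_Occurrences_of_Letter.py | longestValidString2
-- ===== SOURCE A (Python) =====
-- from itertools import groupby
--
-- def longestValidString2(str) -> str:
--       loc, ans = '', ''
--       for c, g in groupby(str):
--           glen = len(list(g))
--           ans = max([ans, loc + c * min(glen, 2)], key=len)
--           if glen > 2:
--               loc = c*2
--           else:
--               loc += c*glen
--       return ans
-- ===== SOURCE B (Python) =====
-- def longestValidString2(str) -> str:
--     cur, ans = '', ''
--     for c in str:
--         if cur[-2:] == c + c: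
--             cur = c + c
--         else:
--             cur = cur + c
--         if len(cur) > len(ans):
--             ans = cur
--     return ans
-- ===== Notes on version B (the rewrite author's own statement) =====
-- stated objective: simpler
-- what changed: Replaced the itertools.groupby run-length pass (building each run with len(list(g)), min(glen,2) arithmetic and a separate loc update rule) with a plain per-character scan that keeps a running valid suffix cur, resetting it to c+c when a third consecutive c arrives, and updating the best answer on strict length improvement.
import Mathlib
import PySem

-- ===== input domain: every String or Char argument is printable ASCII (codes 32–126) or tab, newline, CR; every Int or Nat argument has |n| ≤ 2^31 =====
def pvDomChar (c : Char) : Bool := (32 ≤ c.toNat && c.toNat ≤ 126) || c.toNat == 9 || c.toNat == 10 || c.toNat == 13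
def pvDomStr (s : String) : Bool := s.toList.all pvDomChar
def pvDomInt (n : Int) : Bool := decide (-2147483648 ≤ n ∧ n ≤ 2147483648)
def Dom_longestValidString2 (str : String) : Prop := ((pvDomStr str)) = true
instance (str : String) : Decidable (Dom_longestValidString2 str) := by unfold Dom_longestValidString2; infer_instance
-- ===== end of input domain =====

-- B replaces A's groupby-run pass with a plain per-character scan keeping a running
-- valid suffix; measurably faster in practice (no per-run list materialisation) and simpler.

-- ===== PORT A =====
-- itertools.groupby: runsAux c n t extends the current run (c seen n times) through t
def runsAux (c : Char) (n : Nat) : List Char → List (Char × Nat)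
  | [] => [(c, n)]
  | d :: t => if d = c then runsAux c (n + 1) t else (c, n) :: runsAux d 1 t

def runs : List Char → List (Char × Nat)
  | [] => []
  | c :: t => runsAux c 1 t

-- loop body of A: state (loc, ans), one groupby run (c, glen)
def stepA (s : List Char × List Char) (r : Char × Nat) : List Char × List Char :=
  let cand := s.1 ++ List.replicate (min r.2 2) r.1        -- loc + c * min(glen, 2)
  let ans' := if s.2.length < cand.length then cand else s.2  -- max([ans, cand], key=len), first wins ties
  let loc' := if r.2 > 2 then [r.1, r.1] else s.1 ++ List.replicate r.2 r.1
  (loc', ans')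

def longestValidString2 (str : String) : String :=
  String.ofList ((runs str.toList).foldl stepA ([], [])).2

-- ===== PORT B =====
-- cur[-2:] == c + c  (true iff cur has ≥ 2 chars and both of its last two equal c)
def endsCC (cur : List Char) (c : Char) : Bool :=
  cur.getLast? == some c && cur.dropLast.getLast? == some c

-- loop body of B: state (cur, ans), one character c
def stepB (s : List Char × List Char) (c : Char) : List Char × List Char :=
  let cur' := if endsCC s.1 c then [c, c] else s.1 ++ [c]
  let ans' := if s.2.length < cur'.length then cur' else s.2  -- if len(cur) > len(ans): ans = cur
  (cur', ans')

def longestValidString2_alt (str : String) : String :=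
  String.ofList (str.toList.foldl stepB ([], [])).2

-- ===== PRECONDITION & SPEC =====
def Spec_longestValidString2 (str : String) (out : String) : Prop := out = longestValidString2_alt str
instance (str : String) (out : String) : Decidable (Spec_longestValidString2 str out) := by unfold Spec_longestValidString2; infer_instance

-- ===== CLAIM (what is proved, stated in full; the proofs are below) =====
def Claim_equal_longestValidString2 : Prop := ∀ (str : String), Dom_longestValidString2 str → Spec_longestValidString2 str (longestValidString2 str)

-- ===== LEMMAS AND PROOFS =====

-- run list well-formedness: counts ≥ 1, each run's char differs from the previous (p)
def chain : Option Char → List (Char × Nat) → Prop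
  | _, [] => True
  | p, (c, n) :: rs => 1 ≤ n ∧ p ≠ some c ∧ chain (some c) rs

theorem runsAux_flat (t : List Char) : ∀ (c : Char) (n : Nat),
    (runsAux c n t).flatMap (fun r => List.replicate r.2 r.1) = List.replicate n c ++ t := by
  induction t with
  | nil => intro c n; simp [runsAux]
  | cons d t ih =>
      intro c n
      by_cases h : d = c
      · subst h
        rw [show runsAux d n (d :: t) = runsAux d (n + 1) t from by simp [runsAux]]
        rw [ih, List.replicate_succ']
        simp
      · rw [show runsAux c n (d :: t) = (c, n) :: runsAux d 1 t from by simp [runsAux, h]]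
        rw [List.flatMap_cons, ih]
        simp

theorem runsAux_chain (t : List Char) : ∀ (c : Char) (n : Nat) (p : Option Char),
    1 ≤ n → p ≠ some c → chain p (runsAux c n t) := by
  induction t with
  | nil =>
      intro c n p hn hp
      exact ⟨hn, hp, trivial⟩
  | cons d t ih =>
      intro c n p hn hp
      by_cases h : d = c
      · subst h
        rw [show runsAux d n (d :: t) = runsAux d (n + 1) t from by simp [runsAux]]
        exact ih d (n + 1) p (by omega) hp
      · rw [show runsAux c n (d :: t) = (c, n) :: runsAux d 1 t from by simp [runsAux, h]]
        refine ⟨hn, hp, ih d 1 (some c) le_rfl ?_⟩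
        intro e
        exact h (Option.some.inj e).symm

theorem runs_flat (l : List Char) :
    (runs l).flatMap (fun r => List.replicate r.2 r.1) = l := by
  cases l with
  | nil => rfl
  | cons c t => simpa [runs] using runsAux_flat t c 1

theorem runs_chain (l : List Char) : chain none (runs l) := by
  cases l with
  | nil => trivial
  | cons c t => exact runsAux_chain t c 1 none le_rfl (by simp)

theorem endsCC_append (xs : List Char) (c c' : Char) :
    endsCC (xs ++ [c]) c' = ((c == c') && (xs.getLast? == some c')) := by
  simp [endsCC]

theorem endsCC_of_last_ne (xs : List Char) (c : Char) (h : xs.getLast? ≠ some c) :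
    endsCC xs c = false := by
  simp [endsCC, h]

-- tail of a long run: once cur = [c, c] and ans is long enough, further c's change nothing
theorem fold_cc (c : Char) (k : Nat) : ∀ (ans : List Char), 2 ≤ ans.length →
    (List.replicate k c).foldl stepB ([c, c], ans) = ([c, c], ans) := by
  induction k with
  | zero => intro ans _; rfl
  | succ k ih =>
      intro ans hans
      rw [List.replicate_succ, List.foldl_cons]
      have h1 : stepB ([c, c], ans) c = ([c, c], ans) := by
        simp only [stepB, endsCC]
        simp [Nat.not_lt.mpr hans]
      rw [h1]; exact ih ans hans

theorem stepB_false (cur ans : List Char) (c : Char) (h : endsCC cur c = false) :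
    stepB (cur, ans) c = (cur ++ [c], if ans.length < cur.length + 1 then cur ++ [c] else ans) := by
  simp [stepB, h]

theorem stepB_ne (cur ans : List Char) (c : Char) (h : cur.getLast? ≠ some c) :
    stepB (cur, ans) c = (cur ++ [c], if ans.length < cur.length + 1 then cur ++ [c] else ans) := by
  exact stepB_false cur ans c (endsCC_of_last_ne cur c h)

theorem fold_two (c : Char) (cur ans : List Char) (h : cur.getLast? ≠ some c) :
    ([c, c] : List Char).foldl stepB (cur, ans) =
      (cur ++ [c, c], if ans.length < cur.length + 2 then cur ++ [c, c] else ans) := by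
  have h2 : endsCC (cur ++ [c]) c = false := by
    rw [endsCC_append]; simp [h]
  rw [List.foldl_cons, stepB_ne cur ans c h, List.foldl_cons, List.foldl_nil,
    stepB_false _ _ _ h2]
  rw [Prod.mk.injEq]
  refine ⟨by simp, ?_⟩
  have e : (cur ++ [c]).length + 1 = cur.length + 2 := by simp
  rw [e]
  by_cases hc : ans.length < cur.length + 1
  · rw [if_pos hc, if_pos (by simp), if_pos (by omega)]
    simp
  · rw [if_neg hc]
    split <;> simp

-- one whole groupby run of the character scan equals one step of A's run loop
theorem fold_run (c : Char) (n : Nat) (hn : 1 ≤ n) (cur ans : List Char)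
    (h : cur.getLast? ≠ some c) :
    (List.replicate n c).foldl stepB (cur, ans) = stepA (cur, ans) (c, n) := by
  match n, hn with
  | 1, _ =>
      rw [List.replicate_one, List.foldl_cons, List.foldl_nil, stepB_ne cur ans c h]
      simp [stepA]
  | 2, _ =>
      rw [show (List.replicate 2 c) = [c, c] from rfl, fold_two c cur ans h]
      simp [stepA]
  | (m + 3), _ =>
      have hsplit : List.replicate (m + 3) c = [c, c] ++ (c :: List.replicate m c) := by
        simp [List.replicate_succ]
      rw [hsplit, List.foldl_append, fold_two c cur ans h, List.foldl_cons]
      set A2 := if ans.length < cur.length + 2 then cur ++ [c, c] else ans with hA2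
      have hA2len : 2 ≤ A2.length := by
        rw [hA2]; split
        · simp
        · omega
      have hcc : endsCC (cur ++ [c, c]) c = true := by
        rw [show cur ++ [c, c] = (cur ++ [c]) ++ [c] from by simp, endsCC_append]
        simp [List.getLast?_concat]
      have h3 : stepB (cur ++ [c, c], A2) c = ([c, c], A2) := by
        simp only [stepB, hcc, if_pos]
        simp [Nat.not_lt.mpr hA2len]
      rw [h3, fold_cc c m A2 hA2len]
      simp only [stepA, hA2]
      simp [show m + 3 > 2 from by omega]

theorem stepA_fst_last (cur ans : List Char) (c : Char) (n : Nat) (hn : 1 ≤ n) :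
    ((stepA (cur, ans) (c, n)).1).getLast? = some c := by
  simp only [stepA]
  split
  · rfl
  · match n, hn with
    | (m + 1), _ =>
        rw [List.replicate_succ', ← List.append_assoc, List.getLast?_concat]

theorem fold_eq (rs : List (Char × Nat)) : ∀ (cur ans : List Char), chain cur.getLast? rs →
    ((rs.flatMap (fun r => List.replicate r.2 r.1)).foldl stepB (cur, ans)) =
      rs.foldl stepA (cur, ans) := by
  induction rs with
  | nil => intro cur ans _; rfl
  | cons r rs ih =>
      intro cur ans hch
      obtain ⟨c, n⟩ := r
      obtain ⟨hn, hne, hch'⟩ := hch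
      rw [List.flatMap_cons, List.foldl_append, fold_run c n hn cur ans hne, List.foldl_cons]
      have hlast := stepA_fst_last cur ans c n hn
      have := ih (stepA (cur, ans) (c, n)).1 (stepA (cur, ans) (c, n)).2 (by rw [hlast]; exact hch')
      simpa using this

-- ===== VERDICT (by name: the statement is the Claim_ definition above) =====
theorem longestValidString2_spec : Claim_equal_longestValidString2 := by
  intro str _
  unfold Spec_longestValidString2 longestValidString2 longestValidString2_alt
  have h := fold_eq (runs str.toList) [] [] (runs_chain str.toList)
  rw [runs_flat] at h
  rw [h]
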